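-- pv_equiv track=rewrite | github.com/ryandt2305-cpu/MG-Sprite-Customiser | tools/build_flat_atlas.py | pack_sprites
-- ===== SOURCE A (Python) =====
-- def pack_sprites(items, max_width: int, padding: int):
--     items = sorted(items, key=lambda it: it["h"], reverse=True)
--     x = padding
--     y = padding
--     shelf_h = 0
--     placed = []
--     for it in items:
--         w = it["w"] + padding * 2
--         h = it["h"] + padding * 2
--         if x + w > max_width and x > padding:
--             x = padding
--             y += shelf_h
--             shelf_h = 0
--         placed.append({**it, "x": x + padding, "y": y + padding})
--         x += w
--         shelf_h = max(shelf_h, h)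
--     atlas_w = max_width
--     atlas_h = y + shelf_h
--     return placed, atlas_w, atlas_h
-- ===== SOURCE B (Python) =====
-- def pack_sprites(items, max_width: int, padding: int):
--     # Phase 1: group the height-sorted items into explicit shelves.
--     order = sorted(items, key=lambda it: it["h"], reverse=True)
--     shelves = []
--     cur, cur_w, cur_h = [], 0, 0
--     for it in order:
--         w = it["w"] + padding * 2
--         h = it["h"] + padding * 2
--         if cur_w > 0 and padding + cur_w + w > max_width:
--             shelves.append((cur, cur_h))
--             cur, cur_w, cur_h = [], 0, 0
--         cur.append((it, w))
--         cur_w += w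
--         cur_h = max(cur_h, h)
--     shelves.append((cur, cur_h))
--     # Phase 2: lay the shelves out with a running y, items with a running x.
--     placed = []
--     y = padding
--     for row, row_h in shelves:
--         x = padding
--         for it, w in row:
--             placed.append({**it, "x": x + padding, "y": y + padding})
--             x += w
--         y += row_h
--     return placed, max_width, y
-- ===== Notes on version B (the rewrite author's own statement) =====
-- stated objective: alternative
-- what changed: Replaces A's single loop with mutable cursor/shelf-height state by a two-phase decomposition: first group items into an explicit list of shelves (rows with their heights), then lay the shelves out with nested running-x/running-y passes; atlas height is the final y after the shelf walk.
-- outside the precondition, e.g. on pack_sprites([{'w': 1}], 10, 0): A raises KeyError, B raises KeyError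
import Mathlib
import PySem

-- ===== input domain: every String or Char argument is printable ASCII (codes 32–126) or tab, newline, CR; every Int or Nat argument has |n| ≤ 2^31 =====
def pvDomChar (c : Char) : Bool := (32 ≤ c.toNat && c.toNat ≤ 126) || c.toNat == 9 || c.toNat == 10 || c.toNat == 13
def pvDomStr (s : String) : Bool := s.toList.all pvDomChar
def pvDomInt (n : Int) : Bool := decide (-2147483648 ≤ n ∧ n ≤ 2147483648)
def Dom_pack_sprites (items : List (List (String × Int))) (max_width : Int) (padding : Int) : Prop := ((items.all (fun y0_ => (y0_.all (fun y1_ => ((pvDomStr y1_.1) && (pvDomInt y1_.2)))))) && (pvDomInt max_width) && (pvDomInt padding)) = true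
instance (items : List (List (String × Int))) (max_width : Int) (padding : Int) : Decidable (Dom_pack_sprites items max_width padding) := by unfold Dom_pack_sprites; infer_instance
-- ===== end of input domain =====

-- B re-implements A's shelf packing as two explicit phases (group into shelves, then lay out);
-- equivalence of the return value is proved on all inputs whose items all carry "w" and "h" keys.

-- shared dict primitives on the association-list representation of a Python dict
-- it[k] (exact under Pre_, which guarantees the key is present; first match = the dict's entry)
def pvGetD (d : List (String × Int)) (k : String) : Int :=
  ((d.find? (fun p => p.1 == k)).map (fun p => p.2)).getD 0

-- d with key k set to v: overwrite in place, new keys append (Python dict update)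
def pvSetKey (d : List (String × Int)) (k : String) (v : Int) : List (String × Int) :=
  if d.any (fun p => p.1 == k) then d.map (fun p => if p.1 == k then (k, v) else p)
  else d ++ [(k, v)]

-- {**it, "x": px, "y": py}
def pvPlace (it : List (String × Int)) (px py : Int) : List (String × Int) :=
  pvSetKey (pvSetKey it "x" px) "y" py

-- ===== PORT A =====
-- A's single loop: state (x, y, shelf_h, placed)
def aLoop (mw pad : Int) : List (List (String × Int)) → Int → Int → Int → List (List (String × Int)) → (List (List (String × Int))) × Int × Int
  | [], _x, y, sh, placed => (placed, mw, y + sh)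
  | it :: rest, x, y, sh, placed =>
    let w := pvGetD it "w" + pad * 2
    let h := pvGetD it "h" + pad * 2
    if x + w > mw ∧ x > pad then
      aLoop mw pad rest (pad + w) (y + sh) (max 0 h) (placed ++ [pvPlace it (pad + pad) (y + sh + pad)])
    else
      aLoop mw pad rest (x + w) y (max sh h) (placed ++ [pvPlace it (x + pad) (y + pad)])

def pack_sprites (items : List (List (String × Int))) (max_width : Int) (padding : Int) : (List (List (String × Int))) × Int × Int :=
  let its := PySem.List.sorted items (fun it => pvGetD it "h") true
  aLoop max_width padding its padding padding 0 []

-- ===== PORT B =====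
-- phase 1: group the sorted items into shelves; each shelf is (row of (item, padded width), shelf height)
def bShelves (mw pad : Int) : List (List (String × Int)) → List ((List (String × Int)) × Int) → Int → Int → List ((List ((List (String × Int)) × Int)) × Int) → List ((List ((List (String × Int)) × Int)) × Int)
  | [], cur, _cw, ch, sv => sv ++ [(cur, ch)]
  | it :: rest, cur, cw, ch, sv =>
    let w := pvGetD it "w" + pad * 2
    let h := pvGetD it "h" + pad * 2
    if cw > 0 ∧ pad + cw + w > mw then
      bShelves mw pad rest [(it, w)] w (max 0 h) (sv ++ [(cur, ch)])
    else
      bShelves mw pad rest (cur ++ [(it, w)]) (cw + w) (max ch h) sv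

-- phase 2, inner: one row with a running x
def bPlaceRow (pad : Int) : List ((List (String × Int)) × Int) → Int → Int → List (List (String × Int))
  | [], _x, _y => []
  | (it, w) :: rest, x, y => pvPlace it (x + pad) (y + pad) :: bPlaceRow pad rest (x + w) y

-- phase 2, outer: walk the shelves with a running y; returns (placed, final y = atlas height)
def bPlaceShelves (pad : Int) : List ((List ((List (String × Int)) × Int)) × Int) → Int → (List (List (String × Int))) × Int
  | [], y => ([], y)
  | (row, rh) :: rest, y =>
    let pr := bPlaceShelves pad rest (y + rh)
    (bPlaceRow pad row pad y ++ pr.1, pr.2)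

def pack_sprites_alt (items : List (List (String × Int))) (max_width : Int) (padding : Int) : (List (List (String × Int))) × Int × Int :=
  let its := PySem.List.sorted items (fun it => pvGetD it "h") true
  let shelves := bShelves max_width padding its [] 0 0 []
  let pr := bPlaceShelves padding shelves padding
  (pr.1, max_width, pr.2)

-- ===== PRECONDITION & SPEC =====
-- Pre_ excludes exactly the items missing a "w" or "h" key, where Python's it["h"] / it["w"] raises KeyError.
def Pre_pack_sprites (items : List (List (String × Int))) (max_width : Int) (padding : Int) : Prop :=
  ∀ it ∈ items, (it.find? (fun p => p.1 == "h")).isSome ∧ (it.find? (fun p => p.1 == "w")).isSome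
instance (items : List (List (String × Int))) (max_width : Int) (padding : Int) : Decidable (Pre_pack_sprites items max_width padding) := by unfold Pre_pack_sprites; infer_instance

def pvWitness_pack_sprites : (List (List (String × Int))) × Int × Int :=
  ([[("w", 3), ("h", 2)], [("w", 4), ("h", 1)]], 10, 1)

def Spec_pack_sprites (items : List (List (String × Int))) (max_width : Int) (padding : Int) (out : (List (List (String × Int))) × Int × Int) : Prop := out = pack_sprites_alt items max_width padding
instance (items : List (List (String × Int))) (max_width : Int) (padding : Int) (out : (List (List (String × Int))) × Int × Int) : Decidable (Spec_pack_sprites items max_width padding out) := by unfold Spec_pack_sprites; infer_instance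

-- ===== CLAIM (what is proved, stated in full; the proofs are below) =====
def Claim_equal_pack_sprites : Prop := ∀ (items : List (List (String × Int))) (max_width : Int) (padding : Int), Dom_pack_sprites items max_width padding → Pre_pack_sprites items max_width padding → Spec_pack_sprites items max_width padding (pack_sprites items max_width padding)

-- ===== LEMMAS AND PROOFS =====

-- total padded width of a row
def rowWidth : List ((List (String × Int)) × Int) → Int
  | [] => 0
  | (_, w) :: rest => w + rowWidth rest

theorem rowWidth_append_single (r : List ((List (String × Int)) × Int)) (it : List (String × Int)) (w : Int) :
    rowWidth (r ++ [(it, w)]) = rowWidth r + w := by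
  induction r with
  | nil => simp [rowWidth]
  | cons p r ih => cases p; simp [rowWidth, ih]; ring

theorem bShelves_acc (mw pad : Int) (l : List (List (String × Int)))
    (cur : List ((List (String × Int)) × Int)) (cw ch : Int)
    (sv : List ((List ((List (String × Int)) × Int)) × Int)) :
    bShelves mw pad l cur cw ch sv = sv ++ bShelves mw pad l cur cw ch [] := by
  induction l generalizing cur cw ch sv with
  | nil => simp [bShelves]
  | cons it rest ih =>
    simp only [bShelves]
    split_ifs with h
    · rw [ih _ _ _ (sv ++ _), ih _ _ _ ([] ++ _)]
      simp
    · rw [ih _ _ _ sv]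

theorem bPlaceRow_append_single (pad : Int) (r : List ((List (String × Int)) × Int))
    (it : List (String × Int)) (w x y : Int) :
    bPlaceRow pad (r ++ [(it, w)]) x y
      = bPlaceRow pad r x y ++ [pvPlace it (x + rowWidth r + pad) (y + pad)] := by
  induction r generalizing x with
  | nil => simp [bPlaceRow, rowWidth]
  | cons p r ih =>
    cases p with
    | mk it' w' =>
      simp only [List.cons_append, bPlaceRow, ih, rowWidth]
      have harith : x + w' + rowWidth r = x + (w' + rowWidth r) := by ring
      rw [harith]

theorem main_invariant (mw pad : Int) (l : List (List (String × Int)))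
    (cur : List ((List (String × Int)) × Int)) (ch y : Int)
    (P0 : List (List (String × Int))) :
    aLoop mw pad l (pad + rowWidth cur) y ch (P0 ++ bPlaceRow pad cur pad y)
      = ((P0 ++ (bPlaceShelves pad (bShelves mw pad l cur (rowWidth cur) ch []) y).1), mw,
         (bPlaceShelves pad (bShelves mw pad l cur (rowWidth cur) ch []) y).2) := by
  induction l generalizing cur ch y P0 with
  | nil => simp [aLoop, bShelves, bPlaceShelves]
  | cons it rest ih =>
    simp only [aLoop, bShelves]
    have hcond : (pad + rowWidth cur + (pvGetD it "w" + pad * 2) > mw ∧ pad + rowWidth cur > pad)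
        ↔ (rowWidth cur > 0 ∧ pad + rowWidth cur + (pvGetD it "w" + pad * 2) > mw) := by
      constructor <;> (intro h; exact ⟨by omega, by omega⟩)
    split_ifs with h h2 h2
    · -- wrap
      rw [bShelves_acc]
      have hrw : pad + (pvGetD it "w" + pad * 2) = pad + rowWidth [(it, pvGetD it "w" + pad * 2)] := by
        simp [rowWidth]
      have hpr : P0 ++ bPlaceRow pad cur pad y ++ [pvPlace it (pad + pad) (y + ch + pad)]
          = (P0 ++ bPlaceRow pad cur pad y) ++ bPlaceRow pad [(it, pvGetD it "w" + pad * 2)] pad (y + ch) := by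
        simp [bPlaceRow]
      rw [hrw, hpr, ih]
      simp [bPlaceShelves, rowWidth]
    · exact absurd (hcond.mp h) h2
    · exact absurd (hcond.mpr h2) h
    · -- no wrap
      have hrw : pad + rowWidth cur + (pvGetD it "w" + pad * 2)
          = pad + rowWidth (cur ++ [(it, pvGetD it "w" + pad * 2)]) := by
        rw [rowWidth_append_single]; ring
      have hpr : P0 ++ bPlaceRow pad cur pad y ++ [pvPlace it (pad + rowWidth cur + pad) (y + pad)]
          = P0 ++ bPlaceRow pad (cur ++ [(it, pvGetD it "w" + pad * 2)]) pad y := by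
        rw [bPlaceRow_append_single]; simp
      rw [hrw, hpr, ih, ← rowWidth_append_single]

-- ===== VERDICT (by name: the statement is the Claim_ definition above) =====
theorem pack_sprites_spec : Claim_equal_pack_sprites := by
  intro items mw pad _ _
  unfold Spec_pack_sprites pack_sprites pack_sprites_alt
  have := main_invariant mw pad (PySem.List.sorted items (fun it => pvGetD it "h") true) [] 0 pad []
  simp only [rowWidth, bPlaceRow, List.append_nil, List.nil_append, add_zero] at this
  rw [this]
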